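-- pv_equiv track=rewrite | github.com/Aasthaengg/IBMdataset | Python_codes/p02609/s854164875.py | func
-- ===== SOURCE A (Python) =====
-- def func(c):
--     x = c.count("1")
--     if x == 0:
--         return 0
--     n = 1
--     nsum = 0
--     for i in reversed(range(len(c))):
--         nsum += n * int(c[i])
--         n = n % x if n > x else n
--         if n == 0:
--             break
--         n *= 2
--     nsum %= x
--     cans = bin(nsum).count("1")
--     if cans == 0:
--         return 1
--     else:
--         return 1 + func(bin(nsum)[2:])
-- ===== SOURCE B (Python) =====
-- def func(c):
--     x = c.count("1")
--     if x == 0: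
--         return 0
--     n = 0
--     for ch in c:
--         n = 2 * n + int(ch)
--     n %= x
--     steps = 1
--     while n != 0:
--         n %= bin(n).count("1")
--         steps += 1
--     return steps
-- ===== Notes on version B (the rewrite author's own statement) =====
-- stated objective: simpler
-- what changed: Replaces A's recursion on the residual's binary string and its manual per-bit modular accumulation with one number conversion (n = value of c) followed by a flat while-loop with a step counter: n %= popcount(n) until 0.
-- outside the precondition, e.g. on func('a10'): A returns 1, B raises ValueError
import Mathlib
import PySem

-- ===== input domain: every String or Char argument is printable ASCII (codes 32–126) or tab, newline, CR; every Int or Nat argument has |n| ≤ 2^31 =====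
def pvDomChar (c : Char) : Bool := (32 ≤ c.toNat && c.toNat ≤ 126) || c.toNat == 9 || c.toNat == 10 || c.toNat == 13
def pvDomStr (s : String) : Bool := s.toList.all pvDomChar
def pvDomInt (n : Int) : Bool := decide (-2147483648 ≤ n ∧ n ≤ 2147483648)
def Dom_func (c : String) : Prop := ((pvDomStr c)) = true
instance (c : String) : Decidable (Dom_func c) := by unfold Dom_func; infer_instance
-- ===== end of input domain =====

-- B replaces A's recursion on the residual's binary string (with its manual per-bit modular
-- accumulation loop) by one plain conversion of c to its number followed by a flat counting
-- while-loop n %= popcount(n); objective: simpler.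
-- Both recursions are written over a fuel argument as a structural totality guard only; the
-- supplied fuel is provably sufficient (each recursive call strictly shrinks the measure).

-- ===== PORT A =====
-- int(c[i]) for a single character; none = ValueError (non-digit), excluded by Pre_func
def pvDigit (ch : Char) : Int := (PySem.Int.ofChars? [ch]).getD 0

-- the bit-accumulation loop of A: for i in reversed(range(len(c))) over the characters
def pvLoopA (x : Int) : List Char → Int → Int → Int
  | [], _, nsum => nsum
  | ch :: rest, n, nsum =>
    let nsum' := nsum + n * pvDigit ch
    let n' := if x < n then PySem.Int.mod n x else n
    if n' = 0 then nsum' else pvLoopA x rest (n' * 2) nsum'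

def funcF : Nat → String → Int
  | 0, _ => 0
  | fuel + 1, c =>
    let x : Int := (PySem.Str.count c "1" : Int)
    if x = 0 then 0
    else
      let nsum := pvLoopA x c.toList.reverse 1 0
      let nsum' := PySem.Int.mod nsum x
      let cans := PySem.Str.count (PySem.Int.pyBin nsum') "1"
      if cans = 0 then 1
      else 1 + funcF fuel (PySem.Int.toBin nsum')

-- the recursive argument bin(nsum')[2:] is strictly shorter than c, so len(c)+1 fuel suffices
def func (c : String) : Int := funcF (c.toList.length + 1) c

-- ===== PORT B =====
-- while n != 0: n %= bin(n).count("1"); steps += 1   (n is the nonnegative residue, kept as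
-- Nat; n strictly decreases each iteration, so n+1 fuel suffices)
def pvLoopB : Nat → Nat → Int → Int
  | 0, _, steps => steps
  | fuel + 1, n, steps =>
    if n = 0 then steps
    else pvLoopB fuel (n % PySem.Str.count (PySem.Int.pyBin (n : Int)) "1") (steps + 1)

def func_alt (c : String) : Int :=
  let x : Int := (PySem.Str.count c "1" : Int)
  if x = 0 then 0
  else
    let n : Nat := (PySem.Int.mod (c.toList.foldl (fun n ch => 2 * n + pvDigit ch) 0) x).toNat
    pvLoopB (n + 1) n 1

-- ===== PRECONDITION & SPEC =====
-- Pre_func admits any string in which the one-digit never occurs (both programs return 0 before parsing anything)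
-- and any all-digit string; it excludes strings that contain a '1' together with a non-digit
-- character: there int() raises ValueError in both programs (A's early loop break lets it
-- accidentally return before reaching the bad character on a few such strings, e.g. "a10").
def Pre_func (c : String) : Prop :=
  c.toList.count '1' = 0 ∨ c.toList.all Char.isDigit = true
instance (c : String) : Decidable (Pre_func c) := by unfold Pre_func; infer_instance

def pvWitness_func : String := "10"

def Spec_func (c : String) (out : Int) : Prop := out = func_alt c
instance (c : String) (out : Int) : Decidable (Spec_func c out) := by unfold Spec_func; infer_instance

-- ===== CLAIM (what is proved, stated in full; the proofs are below) =====
def Claim_equal_func : Prop := ∀ (c : String), Dom_func c → Pre_func c → Spec_func c (func c)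

-- ===== LEMMAS AND PROOFS =====

-- binary digit list of a Nat; used only to reason about Nat.toDigits 2 (= bin(n)[2:])
def pvBinNat (n : Nat) : List Char :=
  if n < 2 then [Nat.digitChar n] else pvBinNat (n / 2) ++ [Nat.digitChar (n % 2)]
termination_by n
decreasing_by omega

lemma pvBinNat_zero : pvBinNat 0 = ['0'] := by rw [pvBinNat]; decide

lemma pvBinNat_one : pvBinNat 1 = ['1'] := by rw [pvBinNat]; decide

lemma pvToDigitsCore_eq : ∀ (f n : Nat) (ds : List Char), n ≤ f →
    Nat.toDigitsCore 2 (f + 1) n ds = pvBinNat n ++ ds := by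
  intro f
  induction f with
  | zero =>
    intro n ds hn
    have h0 : n = 0 := Nat.le_zero.mp hn
    subst h0
    simp [Nat.toDigitsCore, pvBinNat]
  | succ f ih =>
    intro n ds hn
    rw [Nat.toDigitsCore]
    by_cases h2 : n / 2 = 0
    · have hn2 : n < 2 := by omega
      simp only [h2]
      rw [pvBinNat, if_pos hn2]
      have hmod : n % 2 = n := Nat.mod_eq_of_lt hn2
      simp [hmod]
    · simp only [h2]
      conv_rhs => rw [pvBinNat, if_neg (by omega)]
      rw [ih (n / 2) ((n % 2).digitChar :: ds) (by omega)]
      simp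

lemma pvToDigits_two (n : Nat) : Nat.toDigits 2 n = pvBinNat n := by
  unfold Nat.toDigits
  rw [pvToDigitsCore_eq n n [] le_rfl]
  simp

lemma pvCount_go : ∀ (f : Nat) (a : Char) (l : List Char) (acc : Nat), l.length ≤ f →
    PySem.Chars.count.go [a] f l acc = acc + l.count a := by
  intro f
  induction f with
  | zero =>
    intro a l acc hl
    have h0 : l = [] := List.eq_nil_of_length_eq_zero (by omega)
    subst h0
    simp [PySem.Chars.count.go]
  | succ f ih =>
    intro a l acc hl
    match l with
    | [] => simp [PySem.Chars.count.go]
    | h :: t =>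
      have hlen : t.length ≤ f := by
        simp only [List.length_cons] at hl
        omega
      rw [PySem.Chars.count.go]
      by_cases hah : a = h
      · subst hah
        rw [if_pos (by simp [List.isPrefixOf])]
        have hdrop : List.drop ([a].length) (a :: t) = t := by simp
        rw [hdrop, ih a t (acc + 1) hlen, List.count_cons_self]
        omega
      · rw [if_neg (by simp [List.isPrefixOf, hah])]
        rw [ih a t acc hlen, List.count_cons_of_ne (Ne.symm hah)]

lemma pvCount_singleton (l : List Char) (a : Char) :
    PySem.Chars.count l [a] = l.count a := by
  rw [PySem.Chars.count, if_neg (by simp)]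
  simpa using pvCount_go l.length a l 0 le_rfl

lemma pvStrCount_one (s : String) : PySem.Str.count s "1" = s.toList.count '1' := by
  rw [PySem.Str.count_eq]
  exact pvCount_singleton s.toList '1'

lemma pvToBin_toList (k : Nat) :
    (PySem.Int.toBin (k : Int)).toList = pvBinNat k := by
  rw [PySem.Int.toList_toBin, PySem.Int.toBinChars]
  rw [if_neg (by omega)]
  simp [pvToDigits_two]

lemma pvPyBin_count (k : Nat) :
    PySem.Str.count (PySem.Int.pyBin (k : Int)) "1" = (pvBinNat k).count '1' := by
  rw [pvStrCount_one, PySem.Int.toList_pyBin, PySem.Int.toBinChars0b]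
  rw [if_neg (by omega)]
  simp [pvToDigits_two]

lemma pvBinNat_count_pos : ∀ k : Nat, 1 ≤ k → 0 < (pvBinNat k).count '1' := by
  intro k
  induction k using Nat.strong_induction_on with
  | _ k ih =>
    intro hk
    by_cases h2 : k < 2
    · have hk1 : k = 1 := by omega
      subst hk1
      rw [pvBinNat_one]
      simp
    · rw [pvBinNat, if_neg h2, List.count_append]
      have := ih (k / 2) (by omega) (by omega)
      omega

lemma pvBinNat_length_le : ∀ k : Nat, 1 ≤ k → (pvBinNat k).length ≤ k := by
  intro k
  induction k using Nat.strong_induction_on with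
  | _ k ih =>
    intro hk
    by_cases h2 : k < 2
    · rw [pvBinNat, if_pos h2]
      simp only [List.length_cons, List.length_nil]
      omega
    · rw [pvBinNat, if_neg h2, List.length_append]
      have := ih (k / 2) (by omega) (by omega)
      simp only [List.length_cons, List.length_nil]
      omega

lemma funcF_unfold (fuel : Nat) (c : String) : funcF (fuel + 1) c =
    if (PySem.Str.count c "1" : Int) = 0 then 0
    else if PySem.Str.count (PySem.Int.pyBin (PySem.Int.mod
        (pvLoopA (PySem.Str.count c "1" : Int) c.toList.reverse 1 0)
        (PySem.Str.count c "1" : Int))) "1" = 0 then 1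
    else 1 + funcF fuel (PySem.Int.toBin (PySem.Int.mod
        (pvLoopA (PySem.Str.count c "1" : Int) c.toList.reverse 1 0)
        (PySem.Str.count c "1" : Int))) := by
  conv_lhs => rw [funcF]

lemma func_alt_unfold (c : String) : func_alt c =
    if (PySem.Str.count c "1" : Int) = 0 then 0
    else pvLoopB ((PySem.Int.mod (c.toList.foldl (fun n ch => 2 * n + pvDigit ch) 0)
        (PySem.Str.count c "1" : Int)).toNat + 1)
      (PySem.Int.mod (c.toList.foldl (fun n ch => 2 * n + pvDigit ch) 0)
        (PySem.Str.count c "1" : Int)).toNat 1 := by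
  unfold func_alt
  rfl

lemma pvLoopB_zero : ∀ (fuel : Nat) (s : Int), pvLoopB fuel 0 s = s := by
  intro fuel s
  cases fuel <;> simp [pvLoopB]

-- value of a bit/character list read least-significant first
def pvRevVal : List Char → Int
  | [] => 0
  | ch :: r => pvDigit ch + 2 * pvRevVal r

lemma pvRevVal_append (u : List Char) (ch : Char) :
    pvRevVal (u ++ [ch]) = pvRevVal u + 2 ^ u.length * pvDigit ch := by
  induction u with
  | nil => simp [pvRevVal]
  | cons c r ih =>
    simp only [List.cons_append, pvRevVal, ih, List.length_cons]
    ring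

lemma pvFoldl_eq : ∀ (l : List Char) (a : Int),
    l.foldl (fun acc ch => 2 * acc + pvDigit ch) a = a * 2 ^ l.length + pvRevVal l.reverse := by
  intro l
  induction l with
  | nil => intro a; simp [pvRevVal]
  | cons ch rest ih =>
    intro a
    simp only [List.foldl_cons, List.reverse_cons, List.length_cons]
    rw [ih, pvRevVal_append]
    simp [List.length_reverse]
    ring

lemma pvLoopA_mod (x : Int) (hx : 0 < x) : ∀ (l : List Char) (n nsum : Int),
    pvLoopA x l n nsum % x = (nsum + n * pvRevVal l) % x := by
  intro l
  induction l with
  | nil => intro n nsum; simp [pvLoopA, pvRevVal]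
  | cons ch rest ih =>
    intro n nsum
    rw [pvLoopA]
    show (if (if x < n then PySem.Int.mod n x else n) = 0
        then nsum + n * pvDigit ch
        else pvLoopA x rest ((if x < n then PySem.Int.mod n x else n) * 2)
          (nsum + n * pvDigit ch)) % x
      = (nsum + n * pvRevVal (ch :: rest)) % x
    have hmod : (if x < n then PySem.Int.mod n x else n) % x = n % x := by
      by_cases h : x < n
      · rw [if_pos h, PySem.Int.mod_eq_emod_of_pos hx, Int.emod_emod_of_dvd n dvd_rfl]
      · rw [if_neg h]
    set n' : Int := if x < n then PySem.Int.mod n x else n with hn'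
    obtain ⟨t, ht⟩ : x ∣ n - n' := (show n' ≡ n [ZMOD x] from hmod).dvd
    by_cases hz : n' = 0
    · rw [if_pos hz]
      have hn0 : n = x * t := by omega
      have e1 : nsum + n * pvRevVal (ch :: rest)
          = (nsum + n * pvDigit ch) + x * (t * (2 * pvRevVal rest)) := by
        rw [pvRevVal, hn0]; ring
      rw [e1, Int.add_mul_emod_self_left]
    · rw [if_neg hz, ih]
      have e2 : nsum + n * pvDigit ch + n' * 2 * pvRevVal rest
          = (nsum + n * pvRevVal (ch :: rest)) + x * (-t * (2 * pvRevVal rest)) := by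
        have hnt : n' = n - x * t := by omega
        rw [pvRevVal, hnt]; ring
      rw [e2, Int.add_mul_emod_self_left]

lemma pvBinNat_foldl : ∀ (k : Nat) (a : Int),
    (pvBinNat k).foldl (fun acc ch => 2 * acc + pvDigit ch) a
      = a * 2 ^ (pvBinNat k).length + k := by
  intro k
  induction k using Nat.strong_induction_on with
  | _ k ih =>
    intro a
    by_cases h2 : k < 2
    · rw [pvBinNat, if_pos h2]
      have h0 : pvDigit (Nat.digitChar 0) = 0 := by decide
      have h1 : pvDigit (Nat.digitChar 1) = 1 := by decide
      rcases (by omega : k = 0 ∨ k = 1) with rfl | rfl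
      · simp only [List.foldl_cons, List.foldl_nil, List.length_cons, List.length_nil, h0,
          Nat.cast_zero]
        ring
      · simp only [List.foldl_cons, List.foldl_nil, List.length_cons, List.length_nil, h1,
          Nat.cast_one]
        ring
    · rw [pvBinNat, if_neg h2, List.foldl_append, ih (k / 2) (by omega)]
      simp only [List.foldl_cons, List.foldl_nil, List.length_append, List.length_cons,
        List.length_nil]
      have hd : pvDigit (Nat.digitChar (k % 2)) = ((k % 2 : Nat) : Int) := by
        rcases Nat.mod_two_eq_zero_or_one k with h | h <;> rw [h] <;> decide
      have hk2 : ((k : Nat) : Int) = 2 * ((k / 2 : Nat) : Int) + ((k % 2 : Nat) : Int) := by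
        push_cast
        omega
      rw [hd, pow_succ, hk2]
      ring

-- A's accumulated sum mod x equals the straight value of c mod x
lemma pvCore (c : String) (x : Int) (hx : 0 < x) :
    PySem.Int.mod (pvLoopA x c.toList.reverse 1 0) x
      = PySem.Int.mod (c.toList.foldl (fun n ch => 2 * n + pvDigit ch) 0) x := by
  rw [PySem.Int.mod_eq_emod_of_pos hx, PySem.Int.mod_eq_emod_of_pos hx]
  rw [pvLoopA_mod x hx]
  rw [pvFoldl_eq]
  simp

-- the flat loop of B agrees with A's recursion on the residual's binary string,
-- for any sufficient fuel on both sides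
lemma pvMain : ∀ (m : Nat), 1 ≤ m → ∀ (fa fb : Nat) (s : Int),
    (pvBinNat m).length < fa → m < fb →
    pvLoopB fb m s = s + funcF fa (PySem.Int.toBin (m : Int)) := by
  intro m
  induction m using Nat.strong_induction_on with
  | _ m ih =>
    intro hm fa fb s hfa hfb
    obtain ⟨fa', rfl⟩ : ∃ fa', fa = fa' + 1 := ⟨fa - 1, by omega⟩
    obtain ⟨fb', rfl⟩ : ∃ fb', fb = fb' + 1 := ⟨fb - 1, by omega⟩
    have hppos : 0 < (pvBinNat m).count '1' := pvBinNat_count_pos m hm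
    have hlenm : (pvBinNat m).length ≤ m := pvBinNat_length_le m hm
    have hcle : (pvBinNat m).count '1' ≤ (pvBinNat m).length := List.count_le_length
    have hx : (PySem.Str.count (PySem.Int.toBin (m : Int)) "1" : Int)
        = ((pvBinNat m).count '1' : Int) := by
      rw [pvStrCount_one, pvToBin_toList]
    rw [funcF_unfold, hx]
    rw [if_neg (by exact_mod_cast hppos.ne')]
    rw [pvCore (PySem.Int.toBin (m : Int)) _ (by exact_mod_cast hppos)]
    have hval : (PySem.Int.toBin (m : Int)).toList.foldl
        (fun n ch => 2 * n + pvDigit ch) 0 = (m : Int) := by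
      rw [pvToBin_toList]
      have := pvBinNat_foldl m 0
      simpa using this
    rw [hval, PySem.Int.mod_natCast, pvPyBin_count]
    rw [pvLoopB, if_neg (by omega), pvPyBin_count]
    by_cases hz : m % (pvBinNat m).count '1' = 0
    · rw [hz, pvBinNat_zero, if_pos (by decide), pvLoopB_zero]
    · rw [if_neg (by
        have := pvBinNat_count_pos (m % (pvBinNat m).count '1') (by omega)
        omega)]
      have hmodlt : m % (pvBinNat m).count '1' < (pvBinNat m).count '1' :=
        Nat.mod_lt m hppos
      have hlen' : (pvBinNat (m % (pvBinNat m).count '1')).length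
          ≤ m % (pvBinNat m).count '1' :=
        pvBinNat_length_le _ (by omega)
      rw [ih (m % (pvBinNat m).count '1') (by omega) (by omega) fa' fb' (s + 1)
        (by omega) (by omega)]
      ring

-- ===== VERDICT (by name: the statement is the Claim_ definition above) =====
theorem func_spec : Claim_equal_func := by
  intro c _ _
  unfold Spec_func func
  rw [funcF_unfold, func_alt_unfold]
  by_cases hx : (PySem.Str.count c "1" : Int) = 0
  · rw [if_pos hx, if_pos hx]
  · rw [if_neg hx, if_neg hx]
    have hxpos : 0 < (PySem.Str.count c "1" : Int) := by omega
    have hcl : PySem.Str.count c "1" ≤ c.toList.length := by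
      rw [pvStrCount_one]
      exact List.count_le_length
    rw [pvCore c _ hxpos]
    obtain ⟨k, hk⟩ : ∃ k : Nat, PySem.Int.mod
        (c.toList.foldl (fun n ch => 2 * n + pvDigit ch) 0)
        (PySem.Str.count c "1" : Int) = (k : Int) :=
      ⟨_, (Int.toNat_of_nonneg (PySem.Int.mod_nonneg _ hxpos)).symm⟩
    have hklt : (k : Int) < (PySem.Str.count c "1" : Int) := hk ▸ PySem.Int.mod_lt _ hxpos
    rw [hk, pvPyBin_count]
    simp only [Int.toNat_natCast]
    by_cases hz : k = 0
    · rw [hz, pvBinNat_zero, if_pos (by decide), pvLoopB_zero]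
    · have hk1 : 1 ≤ k := by omega
      rw [if_neg (by have := pvBinNat_count_pos k hk1; omega)]
      have hlenk : (pvBinNat k).length ≤ k := pvBinNat_length_le k hk1
      rw [pvMain k hk1 c.toList.length (k + 1) 1 (by omega) (by omega)]
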